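-- pv_equiv track=rewrite | github.com/Nexedi/erp5 | bt5/erp5_officejs_appstore_base/SkinTemplateItem/portal_skins/erp5_officejs_appstore_base/SoftwarePublication_submitSoftwarePublication.py | getBaseDirectory
-- ===== SOURCE A (Python) =====
-- def getBaseDirectory(namelist):
--   base = ""
--   for name in namelist:
--     if "/" in name:
--       temp_base = name.split("/")[0]
--       if base and base != temp_base:
--         base = ""
--         break
--       else:
--         base = temp_base
--     else:
--       base = ""
--       break
--   if base:
--     base += "/"
--   return base
-- ===== SOURCE B (Python) =====
-- def getBaseDirectory(namelist):
--   tops = set()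
--   for name in namelist:
--     head, sep, _ = name.partition("/")
--     if not sep:
--       return ""
--     tops.add(head)
--   if len(tops) == 1:
--     top = tops.pop()
--     if top:
--       return top + "/"
--   return ""
-- ===== Notes on version B (the rewrite author's own statement) =====
-- stated objective: simpler
-- what changed: Replaces A's sequential running-base loop with early breaks by a one-pass set of all top segments followed by a single uniqueness test.
-- intended difference: On lists where every name contains '/', the leading names start with '/' (empty top segment) and the remaining names all share one top segment t, A skips the leading names and returns t + '/', which is not a base of those names; B returns '', the intended value since the names share no common top directory. — e.g. on getBaseDirectory(["/a", "b/c"]): A returns "b/", B returns ""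
import Mathlib
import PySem

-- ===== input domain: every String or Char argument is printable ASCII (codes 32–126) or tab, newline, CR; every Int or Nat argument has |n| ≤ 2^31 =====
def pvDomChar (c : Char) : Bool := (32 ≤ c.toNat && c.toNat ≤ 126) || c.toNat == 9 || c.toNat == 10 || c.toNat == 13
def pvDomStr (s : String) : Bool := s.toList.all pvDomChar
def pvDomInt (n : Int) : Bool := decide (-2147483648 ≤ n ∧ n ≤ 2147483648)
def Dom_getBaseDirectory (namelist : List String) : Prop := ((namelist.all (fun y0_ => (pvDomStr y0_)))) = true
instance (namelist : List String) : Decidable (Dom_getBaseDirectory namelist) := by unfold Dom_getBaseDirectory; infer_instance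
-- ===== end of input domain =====

-- B collects the set of top segments in one pass and tests afterwards whether it is a
-- single nonempty segment, instead of A's running-base loop with early breaks; on lists
-- whose leading names start with '/' (empty top) A silently skips them, B returns "".

-- ===== PORT A =====
-- name.split("/")[0], ported at the char level with PySem.Chars.splitOn;
-- the [0] index never raises since split always returns a nonempty list
def gbdSplitHead (name : String) : String :=
  String.ofList ((PySem.Chars.splitOn name.toList ['/']).headD [])

def gbdLoop : List String → String → String
  | [], base => base
  | name :: rest, base =>
    if PySem.Str.isIn "/" name then
      let temp_base := gbdSplitHead name
      if base ≠ "" ∧ base ≠ temp_base then ""       -- break leaves base = ""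
      else gbdLoop rest temp_base
    else ""                                          -- break leaves base = ""

def getBaseDirectory (namelist : List String) : String :=
  let base := gbdLoop namelist ""
  if base ≠ "" then base ++ "/" else base

-- ===== PORT B =====
-- name.partition("/") ported by hand (no PySem primitive): head = the chars before the
-- first '/', the separator was found iff '/' occurs in the name; exact for a 1-char separator.
-- Returning "" mid-loop becomes the 'none' branch of the accumulating recursion.
def gbdAltLoop : List String → PySem.Set String → Option (PySem.Set String)
  | [], tops => some tops
  | name :: rest, tops =>
    let head := String.ofList (name.toList.takeWhile (fun c => c ≠ '/'))
    if name.toList.contains '/' then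
      gbdAltLoop rest (PySem.Set.add tops head)
    else none

def getBaseDirectory_alt (namelist : List String) : String :=
  match gbdAltLoop namelist PySem.Set.empty with
  | none => ""
  | some tops =>
    if PySem.Set.len tops = 1 then
      -- tops.pop() on a one-element set: the unique element (order-independent)
      let top := tops.headD ""
      if top ≠ "" then top ++ "/" else ""
    else ""

-- ===== PRECONDITION & SPEC =====
-- helper for D_ only: the top segment of a name (chars before the first '/')
def dTops (l : List String) : List String :=
  l.map fun n => String.ofList (n.toList.take (n.toList.idxOf '/'))

def dSuf (l : List String) : List String := (dTops l).dropWhile String.isEmpty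

-- On lists where every name contains '/', the first names start with '/' (empty top
-- segment, so the tops list starts with "" and dSuf drops something) and the remaining
-- names all share one (necessarily nonempty) top segment: A skips the leading names —
-- leftover loop state — and returns that segment ++ "/", which is not a common base of
-- those names; B returns "", the intended value since the names share no common top
-- directory.
def D_getBaseDirectory (namelist : List String) : Prop :=
  dSuf namelist ≠ dTops namelist ∧ (dSuf namelist).dedup.length = 1 ∧
  ∀ n ∈ namelist, '/' ∈ n.toList
instance (namelist : List String) : Decidable (D_getBaseDirectory namelist) := by
  unfold D_getBaseDirectory; infer_instance

def Spec_getBaseDirectory (namelist : List String) (out : String) : Prop :=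
  ¬ D_getBaseDirectory namelist → out = getBaseDirectory_alt namelist
instance (namelist : List String) (out : String) : Decidable (Spec_getBaseDirectory namelist out) := by
  unfold Spec_getBaseDirectory; infer_instance

def pvDiffWitness_getBaseDirectory : List String := ["/a", "b/c"]
def pvDiffWitnessOut_getBaseDirectory : String × String := ("b/", "")

-- ===== CLAIM (what is proved, stated in full; the proofs are below) =====
def Claim_unchanged_getBaseDirectory : Prop :=
  ∀ (namelist : List String), Dom_getBaseDirectory namelist →
    Spec_getBaseDirectory namelist (getBaseDirectory namelist)
def Claim_changed_getBaseDirectory : Prop :=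
  Dom_getBaseDirectory (pvDiffWitness_getBaseDirectory) ∧
  D_getBaseDirectory (pvDiffWitness_getBaseDirectory) ∧
  getBaseDirectory (pvDiffWitness_getBaseDirectory) = pvDiffWitnessOut_getBaseDirectory.1 ∧
  getBaseDirectory_alt (pvDiffWitness_getBaseDirectory) = pvDiffWitnessOut_getBaseDirectory.2 ∧
  pvDiffWitnessOut_getBaseDirectory.1 ≠ pvDiffWitnessOut_getBaseDirectory.2
def Claim_exact_getBaseDirectory : Prop :=
  ∀ (namelist : List String), Dom_getBaseDirectory namelist →
    D_getBaseDirectory namelist → getBaseDirectory namelist ≠ getBaseDirectory_alt namelist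

-- ===== LEMMAS AND PROOFS =====

-- proof-side helper: the top segment of one name (dTops is its map)
def dTop (n : String) : String := String.ofList (n.toList.take (n.toList.idxOf '/'))

theorem dTops_eq (l : List String) : dTops l = l.map dTop := rfl

-- the chars before the first occurrence are the prefix of non-occurrences
theorem take_idxOf_eq_takeWhile (l : List Char) (a : Char) :
    l.take (l.idxOf a) = l.takeWhile (fun c => c ≠ a) := by
  induction l with
  | nil => simp
  | cons c cs ih =>
    by_cases hc : c = a
    · simp [hc]
    · simp [hc, ih]

-- proof-only helper: the list of top segments, none exactly when some name lacks '/'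
def gbdTops : List String → Option (List String)
  | [] => some []
  | name :: rest =>
    if name.toList.contains '/' then
      match gbdTops rest with
      | some ts => some (String.ofList (name.toList.takeWhile (fun c => c ≠ '/')) :: ts)
      | none => none
    else none

-- [a] is an infix of l iff a is a member of l
theorem infix_singleton_iff {α : Type} (a : α) (l : List α) : [a] <:+: l ↔ a ∈ l := by
  constructor
  · intro h
    exact (List.singleton_sublist).mp h.sublist
  · intro h
    obtain ⟨s, t, rfl⟩ := List.append_of_mem h
    exact ⟨s, t, by simp⟩

theorem isIn_slash (s : String) : PySem.Str.isIn "/" s = s.toList.contains '/' := by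
  by_cases h : '/' ∈ s.toList
  · have h1 : PySem.Chars.isIn ['/'] s.toList = true :=
      (PySem.Chars.isIn_iff_infix _ _).mpr ((infix_singleton_iff _ _).mpr h)
    simp [h1, h]
  · have h1 : PySem.Chars.isIn ['/'] s.toList = false :=
      (PySem.Chars.isIn_eq_false_iff _ _).mpr (fun hc => h ((infix_singleton_iff _ _).mp hc))
    simp [h1, h]

theorem splitOn_go_headD (fuel : ℕ) (l cur : List Char) (acc : List (List Char))
    (h : l.length ≤ fuel) :
    (PySem.Chars.splitOn.go ['/'] fuel l cur acc).headD [] =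
      (acc.getLast?).getD (cur.reverse ++ l.takeWhile (fun c => c ≠ '/')) := by
  induction fuel generalizing l cur acc with
  | zero =>
    have : l = [] := List.length_eq_zero_iff.mp (Nat.le_zero.mp h)
    subst this
    simp [PySem.Chars.splitOn.go, List.headD_eq_head?_getD, List.head?_reverse]
  | succ n ih =>
    cases l with
    | nil =>
      simp [PySem.Chars.splitOn.go, List.headD_eq_head?_getD, List.head?_reverse]
    | cons c rest =>
      by_cases hc : c = '/'
      · subst hc
        have hpre : List.isPrefixOf ['/'] ('/' :: rest) = true := by
          simp [List.isPrefixOf]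
        rw [PySem.Chars.splitOn.go]
        simp only [hpre, if_true]
        rw [show List.drop (List.length ['/']) ('/' :: rest) = rest by simp]
        rw [ih rest [] (cur.reverse :: acc) (by simpa using Nat.le_of_succ_le_succ h)]
        cases acc with
        | nil => simp
        | cons a as =>
          rcases hx : (a :: as).getLast? with _ | x
          · simp [List.getLast?_eq_none_iff] at hx
          · simp [hx]
      · have hpre : List.isPrefixOf ['/'] (c :: rest) = false := by
          simp [List.isPrefixOf]; exact fun hcc => absurd hcc.symm hc
        rw [PySem.Chars.splitOn.go]
        simp only [hpre]
        rw [if_neg (by simp)]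
        rw [ih rest (c :: cur) acc (by simpa using Nat.le_of_succ_le_succ h)]
        simp [hc]

theorem splitHead_eq (name : String) :
    gbdSplitHead name = String.ofList (name.toList.takeWhile (fun c => c ≠ '/')) := by
  unfold gbdSplitHead PySem.Chars.splitOn
  rw [splitOn_go_headD _ _ _ _ (by omega)]
  simp

-- A's loop from a nonempty base: nonzero iff every remaining top equals the base
theorem gbdLoop_ne (names : List String) (b : String) (hb : b ≠ "") :
    gbdLoop names b =
      match gbdTops names with
      | none => ""
      | some ts => if ts.all (fun x => x == b) then b else "" := by
  induction names generalizing b with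
  | nil => simp [gbdLoop, gbdTops]
  | cons name rest ih =>
    rw [gbdLoop, gbdTops, isIn_slash]
    by_cases hs : name.toList.contains '/'
    · simp only [hs, if_true, splitHead_eq]
      set t := String.ofList (name.toList.takeWhile (fun c => c ≠ '/')) with ht
      by_cases hbt : b = t
      · rw [if_neg (by tauto), ← hbt]
        rw [ih b hb]
        cases h : gbdTops rest with
        | none => simp
        | some ts => simp [List.all_cons]
      · rw [if_pos ⟨hb, hbt⟩]
        cases h : gbdTops rest with
        | none => simp
        | some ts =>
          simp only [List.all_cons]
          rw [if_neg (by simp [beq_iff_eq]; intro hc; exact absurd hc.symm hbt)]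
    · simp only [hs]
      rfl

-- A's loop from the empty base computes the dropWhile-then-constant test over the tops
theorem gbdLoop_empty (names : List String) :
    gbdLoop names "" =
      match gbdTops names with
      | none => ""
      | some ts =>
        match ts.dropWhile (fun t => t == "") with
        | [] => ""
        | t :: rest => if (t :: rest).all (fun x => x == t) then t else "" := by
  induction names with
  | nil => simp [gbdLoop, gbdTops]
  | cons name rest ih =>
    rw [gbdLoop, gbdTops, isIn_slash]
    by_cases hs : name.toList.contains '/'
    · simp only [hs, if_true, splitHead_eq]
      rw [if_neg (by tauto)]
      set t := String.ofList (name.toList.takeWhile (fun c => c ≠ '/')) with ht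
      by_cases hte : t = ""
      · rw [hte, ih]
        cases h : gbdTops rest with
        | none => simp
        | some ts => simp
      · rw [gbdLoop_ne rest t hte]
        cases h : gbdTops rest with
        | none => simp
        | some ts =>
          simp only [List.dropWhile_cons, beq_iff_eq, if_neg hte]
          by_cases hall : ts.all (fun x => x == t)
          · simp [List.all_cons, hall]
          · simp [List.all_cons, hall]
    · simp only [hs]
      rfl

-- the head surviving dropWhile fails the predicate
theorem dropWhile_head_false {α : Type} (p : α → Bool) (l : List α) :
    ∀ t rest, l.dropWhile p = t :: rest → p t = false := by
  induction l with
  | nil => intro t rest h; simp [List.dropWhile] at h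
  | cons a as ih =>
    intro t rest h
    rw [List.dropWhile_cons] at h
    by_cases ha : p a
    · rw [if_pos ha] at h; exact ih t rest h
    · rw [if_neg ha] at h
      cases h; simpa using ha

-- B's accumulating loop is gbdTops folded into the set
theorem altLoop_eq (names : List String) (s : PySem.Set String) :
    gbdAltLoop names s = (gbdTops names).map (fun ts => ts.foldl PySem.Set.add s) := by
  induction names generalizing s with
  | nil => simp [gbdAltLoop, gbdTops]
  | cons name rest ih =>
    rw [gbdAltLoop, gbdTops]
    by_cases hs : name.toList.contains '/'
    · simp only [hs, if_true]
      rw [ih]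
      cases h : gbdTops rest with
      | none => simp
      | some ts => simp [List.foldl_cons]
    · simp at hs
      simp [hs]

-- gbdTops succeeds exactly when every name contains '/', and then yields the dTop map
theorem gbdTops_of_all (names : List String)
    (h : (names.all (fun n => n.toList.contains '/')) = true) :
    gbdTops names = some (names.map dTop) := by
  induction names with
  | nil => simp [gbdTops]
  | cons name rest ih =>
    simp only [List.all_cons, Bool.and_eq_true] at h
    rw [gbdTops]
    simp only [h.1, if_true, ih h.2]
    simp [dTop, take_idxOf_eq_takeWhile]

theorem gbdTops_none (names : List String)
    (h : ¬ (names.all (fun n => n.toList.contains '/')) = true) :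
    gbdTops names = none := by
  induction names with
  | nil => simp at h
  | cons name rest ih =>
    rw [gbdTops]
    by_cases hs : '/' ∈ name.toList
    · have h2 : ¬ (rest.all (fun n => n.toList.contains '/')) = true := by
        simp only [List.all_cons, Bool.and_eq_true] at h
        intro hr
        exact h ⟨by simpa using hs, hr⟩
      rw [ih h2]
      simp [hs]
    · simp [hs]

-- a set with two distinct members of xs cannot be a singleton
theorem ofList_len_ne_one (xs : List String) (a b : String) (ha : a ∈ xs) (hb : b ∈ xs)
    (hab : a ≠ b) : (PySem.Set.ofList xs).length ≠ 1 := by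
  intro h1
  obtain ⟨y, hy⟩ := List.length_eq_one_iff.mp h1
  have hha : a ∈ PySem.Set.ofList xs := (PySem.Set.mem_ofList _ _).mpr ha
  have hhb : b ∈ PySem.Set.ofList xs := (PySem.Set.mem_ofList _ _).mpr hb
  rw [hy] at hha hhb
  simp at hha hhb
  exact hab (hha.trans hhb.symm)

-- constant nonempty list: its set is the singleton
theorem ofList_const (t : String) (xs : List String) (h : ∀ x ∈ xs, x = t) (hne : xs ≠ []) :
    PySem.Set.ofList xs = [t] := by
  have hnd : (PySem.Set.ofList xs).Nodup := PySem.Set.nodup_ofList xs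
  have hmem : ∀ x, x ∈ PySem.Set.ofList xs ↔ x = t := by
    intro x
    rw [PySem.Set.mem_ofList]
    constructor
    · exact h x
    · intro hxt
      obtain ⟨y, ys, hys⟩ := List.exists_cons_of_ne_nil hne
      have hy : y = t := h y (by rw [hys]; simp)
      rw [hxt, ← hy, hys]
      simp
  cases hl : PySem.Set.ofList xs with
  | nil =>
    have : t ∈ PySem.Set.ofList xs := (hmem t).mpr rfl
    rw [hl] at this; simp at this
  | cons y ys =>
    have hy : y = t := (hmem y).mp (by rw [hl]; simp)
    cases ys with
    | nil => rw [hy]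
    | cons z zs =>
      have hz : z = t := (hmem z).mp (by rw [hl]; simp)
      rw [hl] at hnd
      simp [hy, hz] at hnd

-- appending '/' never yields the empty string
theorem append_slash_ne (t : String) : t ++ "/" ≠ "" := by
  intro h
  have := congrArg String.toList h
  simp at this

-- Set.len as a Nat length equation
theorem set_len_one_iff (s : PySem.Set String) : PySem.Set.len s = 1 ↔ s.length = 1 := by
  simp [PySem.Set.len]

-- B's value in terms of the tops list
theorem alt_eq (namelist : List String) :
    getBaseDirectory_alt namelist =
      match gbdTops namelist with
      | none => ""
      | some ts =>
        if (PySem.Set.ofList ts).length = 1 then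
          let top := (PySem.Set.ofList ts).headD ""
          if top ≠ "" then top ++ "/" else ""
        else "" := by
  unfold getBaseDirectory_alt
  rw [altLoop_eq]
  cases h : gbdTops namelist with
  | none => simp
  | some ts =>
    simp only [Option.map_some]
    rw [show List.foldl PySem.Set.add PySem.Set.empty ts = PySem.Set.ofList ts from rfl]
    simp only [set_len_one_iff]

-- String.isEmpty is the (· == "") test
theorem dropWhile_isEmpty_eq (l : List String) :
    l.dropWhile String.isEmpty = l.dropWhile (fun t => t == "") := by
  induction l with
  | nil => rfl
  | cons t rest ih =>
    rw [List.dropWhile_cons, List.dropWhile_cons]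
    by_cases ht : t = ""
    · subst ht; simpa using ih
    · simp [String.isEmpty_iff, ht]

-- dropping leading empties changes the list iff it starts with ""
theorem suf_ne_iff (ts : List String) :
    ts.dropWhile (fun t => t == "") ≠ ts ↔ ts.head? = some "" := by
  cases ts with
  | nil => simp
  | cons t rest =>
    rw [List.dropWhile_cons]
    by_cases ht : t = ""
    · subst ht
      rw [if_pos (by simp)]
      refine iff_of_true ?_ rfl
      intro hEq
      have hsub : (rest.dropWhile (fun t => t == "")).length ≤ rest.length :=
        (List.dropWhile_sublist _).length_le
      have := congrArg List.length hEq
      simp at this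
      omega
    · rw [if_neg (by simp [ht])]
      simp [ht]

-- a nodup list whose members are exactly t is [t]
theorem eq_singleton_of_nodup (xs : List String) (t : String) (hnd : xs.Nodup)
    (hmem : ∀ x, x ∈ xs ↔ x = t) : xs = [t] := by
  cases xs with
  | nil =>
    have := (hmem t).mpr rfl
    simp at this
  | cons y ys =>
    have hy : y = t := (hmem y).mp (by simp)
    cases ys with
    | nil => rw [hy]
    | cons z zs =>
      have hz : z = t := (hmem z).mp (by simp)
      simp [hy, hz] at hnd

-- one distinct element = nonempty and constant
theorem dedup_len_one_iff (l : List String) :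
    l.dedup.length = 1 ↔ (l ≠ [] ∧ (l.all fun x => x == l.headD "") = true) := by
  constructor
  · intro h
    obtain ⟨a, ha⟩ := List.length_eq_one_iff.mp h
    have hmem : ∀ x ∈ l, x = a := by
      intro x hx
      have : x ∈ l.dedup := List.mem_dedup.mpr hx
      rw [ha] at this
      simpa using this
    have hlne : l ≠ [] := by
      rintro rfl
      simp at h
    obtain ⟨y, ys, rfl⟩ := List.exists_cons_of_ne_nil hlne
    refine ⟨hlne, ?_⟩
    rw [List.all_eq_true]
    intro x hx
    simp only [List.headD_cons, beq_iff_eq]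
    exact (hmem x hx).trans (hmem y (by simp)).symm
  · rintro ⟨hne, hall⟩
    obtain ⟨y, ys, rfl⟩ := List.exists_cons_of_ne_nil hne
    rw [List.all_eq_true] at hall
    have hconst : ∀ x ∈ y :: ys, x = y := by
      intro x hx
      have := hall x hx
      simpa using this
    have hd : (y :: ys).dedup = [y] := by
      apply eq_singleton_of_nodup _ _ (List.nodup_dedup _)
      intro x
      rw [List.mem_dedup]
      constructor
      · exact hconst x
      · rintro rfl; simp
    rw [hd]
    rfl

-- D_ unfolded to the conditions the proofs use
theorem D_iff (l : List String) : D_getBaseDirectory l ↔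
    ((l.all fun n => n.toList.contains '/') = true ∧
     (l.map dTop).head? = some "" ∧
     (l.map dTop).dropWhile (fun t => t == "") ≠ [] ∧
     (((l.map dTop).dropWhile (fun t => t == "")).all
        (fun x => x == ((l.map dTop).dropWhile (fun t => t == "")).headD "")) = true) := by
  unfold D_getBaseDirectory dSuf
  rw [dTops_eq, dropWhile_isEmpty_eq]
  constructor
  · rintro ⟨h2, h3, h1⟩
    have h4 := (dedup_len_one_iff _).mp h3
    have hall : (l.all fun n => n.toList.contains '/') = true := by
      rw [List.all_eq_true]
      intro n hn
      simpa using h1 n hn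
    exact ⟨hall, (suf_ne_iff _).mp h2, h4.1, h4.2⟩
  · rintro ⟨hall, h2, h3, h4⟩
    have h1 : ∀ n ∈ l, '/' ∈ n.toList := by
      intro n hn
      simpa using (List.all_eq_true.mp hall) n hn
    exact ⟨(suf_ne_iff _).mpr h2, (dedup_len_one_iff _).mpr ⟨h3, h4⟩, h1⟩

-- the list-level agreement outside the change region-- the list-level agreement outside the change region-- the list-level agreement outside the change region
theorem main_outside (ts : List String)
    (hP : ¬ (ts.head? = some "" ∧ ts.dropWhile (fun t => t == "") ≠ [] ∧
      ((ts.dropWhile (fun t => t == "")).all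
        (fun x => x == (ts.dropWhile (fun t => t == "")).headD "")) = true)) :
    (let base :=
      match ts.dropWhile (fun t => t == "") with
      | [] => ""
      | t :: rest => if (t :: rest).all (fun x => x == t) then t else "";
     if base ≠ "" then base ++ "/" else base) =
    (if (PySem.Set.ofList ts).length = 1 then
      let top := (PySem.Set.ofList ts).headD ""
      if top ≠ "" then top ++ "/" else ""
     else "") := by
  cases hd : ts.dropWhile (fun t => t == "") with
  | nil =>
    have hall : ∀ x ∈ ts, x = "" := by
      intro x hx
      have := List.dropWhile_eq_nil_iff.mp hd x hx
      simpa using this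
    by_cases hts : ts = []
    · subst hts; simp
    · rw [ofList_const "" ts hall hts]
      simp
  | cons t rest =>
    have ht : t ≠ "" := by
      have := dropWhile_head_false (fun t => t == "") ts t rest hd
      simpa using this
    by_cases hallb : ((t :: rest).all (fun x => x == t)) = true
    · -- constant tail; ¬P forces the first element to be ≠ "", so nothing was dropped
      have hh : ts.head? ≠ some "" := by
        intro h
        exact hP ⟨h, by rw [hd]; simp, by rw [hd]; simpa using hallb⟩
      have htsne : ts ≠ [] := by
        intro h0; rw [h0] at hd; simp at hd
      obtain ⟨y, ys, hys⟩ := List.exists_cons_of_ne_nil htsne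
      have hy : ¬ (y == "") = true := by
        intro hy'
        apply hh; rw [hys]; simp at hy'; simp [hy']
      have hts' : y :: ys = t :: rest := by
        rw [hys, List.dropWhile_cons, if_neg hy] at hd
        exact hd
      have hconst : ∀ x ∈ ts, x = t := by
        intro x hx
        rw [hys, hts'] at hx
        rcases List.mem_cons.mp hx with h | h
        · exact h
        · have := (List.all_eq_true.mp hallb) x (by simp [h])
          simpa using this
      rw [ofList_const t ts hconst htsne]
      simp [hallb, ht]
    · -- non-constant tail: both sides are ""
      have hex : ∃ x ∈ t :: rest, x ≠ t := by
        by_contra hc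
        exact hallb (List.all_eq_true.mpr (fun x hx => by
          simp only [beq_iff_eq]
          by_contra hxt
          exact hc ⟨x, hx, hxt⟩))
      obtain ⟨x, hx, hxt⟩ := hex
      have hsub : ∀ z ∈ t :: rest, z ∈ ts := by
        intro z hz
        exact (List.dropWhile_sublist (fun t => t == "")).subset (hd ▸ hz)
      have hne1 := ofList_len_ne_one ts x t (hsub x hx) (hsub t (by simp)) hxt
      simp only [hallb]
      rw [if_neg hne1]
      simp

-- ===== VERDICT (by name: the statement is the Claim_ definition above) =====
theorem getBaseDirectory_spec : Claim_unchanged_getBaseDirectory := by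
  intro namelist _
  unfold Spec_getBaseDirectory
  intro hnD
  unfold getBaseDirectory
  rw [gbdLoop_empty, alt_eq]
  by_cases hall : (namelist.all (fun n => n.toList.contains '/')) = true
  · rw [gbdTops_of_all _ hall]
    simp only
    apply main_outside
    intro hP
    exact hnD ((D_iff namelist).mpr ⟨hall, hP.1, hP.2.1, hP.2.2⟩)
  · rw [gbdTops_none _ hall]
    simp

theorem getBaseDirectory_changed : Claim_changed_getBaseDirectory := by
  unfold Claim_changed_getBaseDirectory; decide

theorem getBaseDirectory_tight : Claim_exact_getBaseDirectory := by
  intro namelist _ hD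
  obtain ⟨hall, hh, hne, hconst⟩ := (D_iff namelist).mp hD
  unfold getBaseDirectory
  rw [gbdLoop_empty, alt_eq, gbdTops_of_all _ hall]
  simp only
  set ts := namelist.map dTop with hts
  cases hd : ts.dropWhile (fun t => t == "") with
  | nil => exact absurd hd hne
  | cons t rest =>
    have ht : t ≠ "" := by
      have := dropWhile_head_false (fun t => t == "") ts t rest hd
      simpa using this
    rw [hd] at hconst
    simp only [List.headD_cons] at hconst
    have hmemE : "" ∈ ts := List.mem_of_mem_head? (by rw [hh]; simp)
    have hmemT : t ∈ ts :=
      (List.dropWhile_sublist (fun t => t == "")).subset (hd ▸ (by simp))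
    have hne1 := ofList_len_ne_one ts "" t hmemE hmemT (fun h => ht h.symm)
    rw [if_neg hne1]
    simp only [hconst, if_true]
    rw [if_pos ht]
    exact append_slash_ne t
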